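-- pv_equiv track=rewrite | github.com/akaNaymin/advent_of_code | day4.py | pw_criteria
-- ===== SOURCE A (Python) =====
-- def pw_criteria(pw):
--     same_adj = False
--     cur_streak = 0
--     digit_cur = 10
--     while pw > 0:
--         digit_next = pw % 10
--         if digit_cur == digit_next:
--             cur_streak += 1
--         else:
--             if cur_streak == 1:
--                 same_adj = True
--             cur_streak = 0
--         if digit_next > digit_cur:
--             return False
--         pw = pw // 10
--         digit_cur = digit_next
--     if cur_streak == 1:
--                 same_adj = True
--     return same_adj
-- ===== SOURCE B (Python) =====
-- def pw_criteria(pw):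
--     if pw <= 0:
--         return False
--     s = str(pw)
--     if any(a > b for a, b in zip(s, s[1:])):
--         return False
--     return any(s.count(c) == 2 for c in s)
-- ===== Notes on version B (the rewrite author's own statement) =====
-- stated objective: idiomatic
-- what changed: B replaces A's right-to-left modular digit extraction with its manual streak counter by the idiomatic string form: str(pw), an adjacent-pair decrease test over zip(s, s[1:]), and a per-character exact-count-of-two test (character counts equal run lengths once the string is non-decreasing).
import Mathlib
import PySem

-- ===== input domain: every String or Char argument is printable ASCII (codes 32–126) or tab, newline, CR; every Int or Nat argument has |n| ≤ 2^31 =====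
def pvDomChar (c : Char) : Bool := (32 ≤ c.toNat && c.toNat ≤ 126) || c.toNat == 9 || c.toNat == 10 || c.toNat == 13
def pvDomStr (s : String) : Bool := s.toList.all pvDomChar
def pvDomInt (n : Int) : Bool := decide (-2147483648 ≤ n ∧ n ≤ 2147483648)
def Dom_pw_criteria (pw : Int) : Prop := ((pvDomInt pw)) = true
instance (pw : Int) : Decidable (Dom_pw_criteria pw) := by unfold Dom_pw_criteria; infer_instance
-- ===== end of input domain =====

-- B re-implements the digit-streak scan over the decimal string: a decreasing-pair test plus a
-- character-count test (idiomatic, not claimed faster); proved equal to A for every Int.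

-- ===== PORT A =====
-- literal port of A's while loop: state (same_adj, cur_streak, digit_cur), digits taken by % 10 // 10
def pwLoopA (pw : Int) (same_adj : Bool) (cur_streak : Int) (digit_cur : Int) : Bool :=
  if h : 0 < pw then
    let digit_next := PySem.Int.mod pw 10
    let same_adj' := if digit_cur = digit_next then same_adj
                     else (if cur_streak = 1 then true else same_adj)
    let cur_streak' := if digit_cur = digit_next then cur_streak + 1 else 0
    if digit_cur < digit_next then false
    else pwLoopA (PySem.Int.floordiv pw 10) same_adj' cur_streak' digit_next
  else
    if cur_streak = 1 then true else same_adj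
termination_by pw.toNat
decreasing_by
  rw [PySem.Int.floordiv_eq_ediv_of_pos (by norm_num : (0:Int) < 10)]
  omega

def pw_criteria (pw : Int) : Bool := pwLoopA pw false 0 10

-- ===== PORT B =====
-- literal port of Source B: s = str(pw); 'zip(s, s[1:])' is the adjacent-pair list (s[1:] = drop 1);
-- s.count(c) of a single character is the character count
def pw_criteria_alt (pw : Int) : Bool :=
  if pw ≤ 0 then false
  else
    let s := (PySem.Int.toStr pw).toList
    if (s.zip (s.drop 1)).any (fun p => decide (p.1 > p.2)) then false
    else s.any (fun c => s.count c == 2)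

-- ===== PRECONDITION & SPEC =====
def Spec_pw_criteria (pw : Int) (out : Bool) : Prop := out = pw_criteria_alt pw
instance (pw : Int) (out : Bool) : Decidable (Spec_pw_criteria pw out) := by unfold Spec_pw_criteria; infer_instance

-- ===== CLAIM (what is proved, stated in full; the proofs are below) =====
def Claim_equal_pw_criteria : Prop := ∀ (pw : Int), Dom_pw_criteria pw → Spec_pw_criteria pw (pw_criteria pw)

-- ===== LEMMAS AND PROOFS =====

-- A's loop replayed over the list of digits (least-significant first), with Nat state
def loopA' : List Nat → Bool → Nat → Nat → Bool
  | [], sa, cs, _ => if cs = 1 then true else sa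
  | d :: L, sa, cs, dc =>
    let sa' := if dc = d then sa else (if cs = 1 then true else sa)
    let cs' := if dc = d then cs + 1 else 0
    if dc < d then false else loopA' L sa' cs' d

-- 'some adjacent pair increases' along dc :: L
def incStep : Nat → List Nat → Bool
  | _, [] => false
  | dc, d :: L => (dc < d) || incStep d L

-- 'some maximal run has length exactly 2', given cs previous copies of dc already seen
def hasRun2 : Nat → Nat → List Nat → Bool
  | cs, _, [] => decide (cs = 1)
  | cs, dc, d :: L => if dc = d then hasRun2 (cs + 1) d L else (decide (cs = 1) || hasRun2 0 d L)

theorem loopA'_eq (L : List Nat) : ∀ (sa : Bool) (cs dc : Nat),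
    loopA' L sa cs dc = if incStep dc L then false else (sa || hasRun2 cs dc L) := by
  induction L with
  | nil =>
    intro sa cs dc
    simp only [loopA', incStep, hasRun2, Bool.false_eq_true, if_false]
    cases sa <;> by_cases hcs : cs = 1 <;> simp [hcs]
  | cons d L ih =>
    intro sa cs dc
    by_cases hd : dc = d
    · subst hd
      simp only [loopA', incStep, hasRun2, lt_irrefl, decide_false, Bool.false_or]
      exact ih sa (cs + 1) dc
    · simp only [loopA', incStep, hasRun2, if_neg hd]
      by_cases hlt : dc < d
      · simp [hlt]
      · simp only [if_neg hlt, hlt, decide_false, Bool.false_or]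
        rw [ih]
        cases h : incStep d L <;>
          · simp [h] <;> cases sa <;> by_cases hcs : cs = 1 <;> simp [hcs]

theorem hasRun2_correct (L : List Nat) : ∀ (dc cs : Nat),
    List.Pairwise (fun a b => b ≤ a) (dc :: L) →
    (hasRun2 cs dc L = true ↔ ∃ v ∈ dc :: L, (dc :: L).count v + (if v = dc then cs else 0) = 2) := by
  induction L with
  | nil =>
    intro dc cs _
    simp [hasRun2, List.count_singleton]
    omega
  | cons e T ih =>
    intro dc cs hp
    by_cases he : dc = e
    · subst he
      rw [show hasRun2 cs dc (dc :: T) = hasRun2 (cs + 1) dc T from by simp [hasRun2]]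
      rw [ih dc (cs + 1) hp.of_cons]
      have key : ∀ v : Nat, (dc :: dc :: T).count v = (dc :: T).count v + (if v = dc then 1 else 0) := by
        intro v
        by_cases hv : v = dc <;> simp [List.count_cons, hv] <;> omega
      constructor
      · rintro ⟨v, hv, hc⟩
        refine ⟨v, by simp at hv ⊢; tauto, ?_⟩
        rw [key v]
        by_cases hvd : v = dc
        · simp only [if_pos hvd] at hc ⊢; omega
        · simp only [if_neg hvd] at hc ⊢; omega
      · rintro ⟨v, hv, hc⟩
        refine ⟨v, by simp at hv ⊢; tauto, ?_⟩
        rw [key v] at hc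
        by_cases hvd : v = dc
        · simp only [if_pos hvd] at hc ⊢; omega
        · simp only [if_neg hvd] at hc ⊢; omega
    · -- dc ≠ e: every element of e :: T is < dc, so dc occurs exactly once
      have h1 : ∀ x ∈ e :: T, x ≤ dc := fun x hx => List.rel_of_pairwise_cons hp hx
      have h2 : ∀ x ∈ T, x ≤ e := fun x hx => List.rel_of_pairwise_cons hp.of_cons hx
      have hed : e < dc := lt_of_le_of_ne (h1 e (by simp)) (fun h => he h.symm)
      have hdc_not : dc ∉ e :: T := by
        intro hmem
        rcases List.mem_cons.mp hmem with h | hT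
        · omega
        · have := h2 dc hT; omega
      have hcount1 : (dc :: e :: T).count dc = 1 := by
        simp [List.count_cons_self, List.count_eq_zero.mpr hdc_not]
      rw [show hasRun2 cs dc (e :: T) = (decide (cs = 1) || hasRun2 0 e T) from by
        simp [hasRun2, he]]
      have ihe := ih e 0 hp.of_cons
      constructor
      · intro h
        rcases Bool.or_eq_true_iff.mp h with h1' | h2'
        · exact ⟨dc, List.mem_cons_self, by rw [hcount1, if_pos rfl]; simp at h1'; omega⟩
        · obtain ⟨v, hv, hc⟩ := ihe.mp h2'
          have hvne : v ≠ dc := fun h => hdc_not (h ▸ hv)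
          have hdv : ¬ dc = v := fun h => hvne h.symm
          refine ⟨v, List.mem_cons_of_mem _ hv, ?_⟩
          rw [if_neg hvne]
          simp only [ite_self] at hc
          rw [show (dc :: e :: T).count v = (e :: T).count v from by
            simp [List.count_cons, hdv]]
          omega
      · rintro ⟨v, hv, hc⟩
        rcases List.mem_cons.mp hv with rfl | hvT
        · rw [hcount1, if_pos rfl] at hc
          simp [show cs = 1 from by omega]
        · have hvne : v ≠ dc := fun h => hdc_not (h ▸ hvT)
          apply Bool.or_eq_true_iff.mpr
          right
          apply ihe.mpr
          have hdv : ¬ dc = v := fun h => hvne h.symm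
          refine ⟨v, hvT, ?_⟩
          rw [if_neg hvne] at hc
          rw [show (dc :: e :: T).count v = (e :: T).count v from by
            simp [List.count_cons, hdv]] at hc
          simp only [ite_self]
          omega

theorem incStep_eq_false_iff (L : List Nat) : ∀ dc : Nat,
    incStep dc L = false ↔ List.IsChain (fun a b => b ≤ a) (dc :: L) := by
  induction L with
  | nil => intro dc; simp [incStep]
  | cons d L ih =>
    intro dc
    simp [incStep, List.isChain_cons_cons, ih]

-- (l.zip l.tail).any as the negation of a chain condition
theorem zipany_eq_not_chain {α : Type} (p : α → α → Bool) (l : List α) :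
    ((l.zip (l.drop 1)).any fun q => p q.1 q.2)
      = ! decide (List.IsChain (fun a b => p a b = false) l) := by
  induction l with
  | nil => simp
  | cons a l ih =>
    cases l with
    | nil => simp
    | cons b t =>
      simp only [List.drop_one, List.tail_cons, List.zip_cons_cons, List.any_cons,
        List.isChain_cons_cons] at *
      rw [ih]
      cases h : p a b <;> simp [h]

theorem digitChar_lt_iff (a b : Nat) (ha : a < 10) (hb : b < 10) :
    (Nat.digitChar a > Nat.digitChar b) ↔ a > b := by
  interval_cases a <;> interval_cases b <;> decide

theorem digitChar_inj_iff (a b : Nat) (ha : a < 10) (hb : b < 10) :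
    (Nat.digitChar a = Nat.digitChar b) ↔ a = b := by
  interval_cases a <;> interval_cases b <;> decide

theorem toDigitsCore_eq (n : Nat) : ∀ (fuel : Nat) (ds : List Char), 0 < n → n ≤ fuel →
    Nat.toDigitsCore 10 fuel n ds = ((Nat.digits 10 n).map Nat.digitChar).reverse ++ ds := by
  induction n using Nat.strong_induction_on with
  | _ n ih =>
    intro fuel ds hn hfuel
    match fuel with
    | 0 => omega
    | fuel + 1 =>
      rw [Nat.toDigitsCore]
      rw [Nat.digits_def' (by norm_num : 1 < 10) hn]
      by_cases h0 : n / 10 = 0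
      · have h10 : n < 10 := by omega
        rw [if_pos h0]
        have : Nat.digits 10 (n / 10) = [] := by rw [h0]; simp
        simp [this]
      · rw [if_neg h0]
        rw [ih (n / 10) (by omega) fuel (Nat.digitChar (n % 10) :: ds) (by omega) (by omega)]
        simp

theorem toDigits_eq (n : Nat) (hn : 0 < n) :
    Nat.toDigits 10 n = ((Nat.digits 10 n).map Nat.digitChar).reverse := by
  rw [Nat.toDigits, toDigitsCore_eq n (n + 1) [] hn (by omega)]
  simp

theorem pwLoopA_nonpos (pw : Int) (h : pw ≤ 0) (sa : Bool) (cs dc : Int) :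
    pwLoopA pw sa cs dc = if cs = 1 then true else sa := by
  rw [pwLoopA, dif_neg (by omega : ¬ 0 < pw)]

-- A's Int loop equals the Nat digit-list replay
theorem pwLoopA_eq (n : Nat) : ∀ (sa : Bool) (cs dc : Nat), 0 < n →
    pwLoopA (n : Int) sa (cs : Int) (dc : Int) = loopA' (Nat.digits 10 n) sa cs dc := by
  induction n using Nat.strong_induction_on with
  | _ n ih =>
    intro sa cs dc hn
    have hm : PySem.Int.mod (n : Int) 10 = ((n % 10 : Nat) : Int) := by
      exact_mod_cast PySem.Int.mod_natCast n 10
    have hf : PySem.Int.floordiv (n : Int) 10 = ((n / 10 : Nat) : Int) := by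
      exact_mod_cast PySem.Int.floordiv_natCast n 10
    rw [pwLoopA, dif_pos (by exact_mod_cast hn : (0 : Int) < (n : Int))]
    rw [Nat.digits_def' (by norm_num : 1 < 10) hn]
    simp only [hm, hf]
    by_cases hdlt : dc < n % 10
    · rw [if_pos (by exact_mod_cast hdlt), show loopA' ((n % 10) :: Nat.digits 10 (n / 10)) sa cs dc = false from by
        simp [loopA', hdlt]]
    · rw [if_neg (by exact_mod_cast hdlt),
        show loopA' ((n % 10) :: Nat.digits 10 (n / 10)) sa cs dc
          = loopA' (Nat.digits 10 (n / 10))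
              (if dc = n % 10 then sa else (if cs = 1 then true else sa))
              (if dc = n % 10 then cs + 1 else 0) (n % 10) from by
          simp only [loopA', if_neg hdlt]]
      simp only [Nat.cast_inj, Nat.cast_eq_one]
      rw [show (if dc = n % 10 then (cs : Int) + 1 else (0 : Int))
            = (((if dc = n % 10 then cs + 1 else 0 : Nat)) : Int) from by split_ifs <;> simp]
      by_cases h0 : n / 10 = 0
      · rw [h0]
        simp only [Nat.digits_zero, Nat.cast_zero]
        rw [pwLoopA_nonpos 0 (by omega)]
        simp only [loopA']
        by_cases hq : dc = n % 10 <;>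
          simp [hq, show ((cs : Int) + 1 = 1) ↔ (cs + 1 = 1) from by omega]
      · exact ih (n / 10) (Nat.div_lt_self hn (by norm_num)) _ _ _ (Nat.pos_of_ne_zero h0)

theorem any_congr_mem {α : Type} {l : List α} {p q : α → Bool} (h : ∀ x ∈ l, p x = q x) :
    l.any p = l.any q := by
  induction l with
  | nil => rfl
  | cons a l ih =>
    simp only [List.any_cons, h a (by simp), ih (fun x hx => h x (by simp [hx]))]

theorem zipany_incStep (L' : List Nat) : ∀ d : Nat,
    (((d :: L').zip L').any fun q => decide (q.1 < q.2)) = incStep d L' := by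
  induction L' with
  | nil => intro d; simp [incStep]
  | cons e T ih => intro d; simp [incStep, ih e]

theorem count_map_digitChar (L : List Nat) (hL : ∀ x ∈ L, x < 10) (v : Nat) (hv : v < 10) :
    List.count (Nat.digitChar v) (L.map Nat.digitChar) = List.count v L := by
  rw [List.count_eq_countP, List.countP_map, List.count_eq_countP]
  apply List.countP_congr
  intro x hx
  simp only [Function.comp, beq_iff_eq]
  exact (digitChar_inj_iff x v (hL x hx) hv)

-- the whole body of B, evaluated over the digit list (least-significant first)
theorem alt_digits (d : Nat) (L' : List Nat) (h10 : ∀ x ∈ d :: L', x < 10) :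
    (if ((((d :: L').map Nat.digitChar).reverse.zip (((d :: L').map Nat.digitChar).reverse.drop 1)).any
          fun p => decide (p.1 > p.2)) then false
     else ((d :: L').map Nat.digitChar).reverse.any
          (fun c => (((d :: L').map Nat.digitChar).reverse.count c == 2)))
    = (if incStep d L' then false else hasRun2 0 d L') := by
  have hzipelem : ∀ q ∈ (d :: L').zip L', q.1 ∈ d :: L' ∧ q.2 ∈ d :: L' := by
    rintro ⟨a, b⟩ hq
    have := List.of_mem_zip hq
    exact ⟨this.1, List.mem_cons_of_mem _ this.2⟩
  have e1 : ((((d :: L').map Nat.digitChar).reverse.zip (((d :: L').map Nat.digitChar).reverse.drop 1)).any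
        fun p => decide (p.1 > p.2)) = incStep d L' := by
    rw [zipany_eq_not_chain (fun a b => decide (a > b))]
    rw [decide_eq_decide.mpr List.isChain_reverse]
    rw [← zipany_eq_not_chain (fun a b => decide (b > a))]
    rw [show ((d :: L').map Nat.digitChar).drop 1 = (L'.map Nat.digitChar) from rfl]
    rw [← zipany_incStep L' d]
    rw [List.zip_map, List.any_map]
    apply any_congr_mem
    intro q hq
    obtain ⟨h1, h2⟩ := hzipelem q hq
    simp only [Function.comp, Prod.map]
    exact decide_eq_decide.mpr (digitChar_lt_iff q.2 q.1 (h10 _ h2) (h10 _ h1))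
  rw [e1]
  cases hc : incStep d L' with
  | true => simp
  | false =>
    simp only [Bool.false_eq_true, if_false]
    have hpair : List.Pairwise (fun a b => b ≤ a) (d :: L') :=
      List.isChain_iff_pairwise.mp ((incStep_eq_false_iff L' d).mp hc)
    have hrun := hasRun2_correct L' d 0 hpair
    simp only [ite_self, Nat.add_zero] at hrun
    have e2 : (((d :: L').map Nat.digitChar).reverse.any
          (fun c => (((d :: L').map Nat.digitChar).reverse.count c == 2)))
        = ((d :: L').any fun v => (d :: L').count v == 2) := by
      simp only [List.any_reverse, List.count_reverse, List.any_map]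
      apply any_congr_mem
      intro v hv
      simp only [Function.comp]
      rw [count_map_digitChar (d :: L') h10 v (h10 v hv)]
    rw [e2]
    rcases hb : ((d :: L').any fun v => (d :: L').count v == 2) with _ | _
    · rw [← hb]
      apply Bool.eq_iff_iff.mpr
      rw [hrun, List.any_eq_true]
      simp only [beq_iff_eq]
    · rw [← hb]
      apply Bool.eq_iff_iff.mpr
      rw [hrun, List.any_eq_true]
      simp only [beq_iff_eq]

theorem main_eq (pw : Int) : pw_criteria pw = pw_criteria_alt pw := by
  by_cases hp : pw ≤ 0
  · rw [pw_criteria, pwLoopA_nonpos pw hp]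
    simp [pw_criteria_alt, hp]
  · have hnpos : 0 < pw.toNat := by omega
    have hcast : ((pw.toNat : Nat) : Int) = pw := Int.toNat_of_nonneg (by omega)
    have hA : pw_criteria pw = loopA' (Nat.digits 10 pw.toNat) false 0 10 := by
      rw [pw_criteria, ← hcast]
      exact_mod_cast pwLoopA_eq pw.toNat false 0 10 hnpos
    obtain ⟨d, L', hL⟩ : ∃ d L', Nat.digits 10 pw.toNat = d :: L' := by
      cases h : Nat.digits 10 pw.toNat with
      | nil => exact absurd h (Nat.digits_ne_nil_iff_ne_zero.mpr (by omega))
      | cons d L' => exact ⟨d, L', rfl⟩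
    have hdig : ∀ x ∈ d :: L', x < 10 := fun x hx =>
      Nat.digits_lt_base (by norm_num) (hL ▸ hx)
    have hd10 : d < 10 := hdig d List.mem_cons_self
    rw [hA, hL, loopA'_eq]
    rw [show incStep 10 (d :: L') = incStep d L' from by
      simp [incStep, show ¬ 10 < d by omega]]
    rw [show hasRun2 0 10 (d :: L') = hasRun2 0 d L' from by
      simp [hasRun2, show (10 : Nat) ≠ d by omega]]
    have hs : (PySem.Int.toStr pw).toList = ((d :: L').map Nat.digitChar).reverse := by
      rw [PySem.Int.toList_toStr]
      rw [show PySem.Int.toChars pw = Nat.toDigits 10 pw.toNat from by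
        simp [PySem.Int.toChars, show ¬ pw < 0 by omega]]
      rw [toDigits_eq pw.toNat hnpos, hL]
    simp only [pw_criteria_alt, if_neg hp, hs]
    rw [alt_digits d L' hdig]
    simp

-- ===== VERDICT (by name: the statement is the Claim_ definition above) =====
theorem pw_criteria_spec : Claim_equal_pw_criteria := by
  intro pw _
  exact main_eq pw
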